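-- pv_equiv track=rewrite | github.com/AryanGupta99/Chatbot | src/hybrid_chatbot.py | get_quick_actions
-- ===== SOURCE A (Python) =====
-- from typing import Dict, Any, List, Optional, Tuple
--
-- def get_quick_actions(query: str) -> List[Dict[str, str]]:
--     """Get quick action buttons based on query"""
--     query_lower = query.lower()
--     actions = []
--
--     if any(word in query_lower for word in ["password", "reset", "login"]):
--         actions.extend([
--             {"text": "Reset Password", "action": "password_reset"},
--             {"text": "Account Locked", "action": "account_locked"},
--             {"text": "Contact Support", "action": "escalate"}
--         ])
--
--     elif any(word in query_lower for word in ["quickbooks", "qb"]):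
--         actions.extend([
--             {"text": "Error Codes", "action": "qb_errors"},
--             {"text": "File Issues", "action": "qb_files"},
--             {"text": "Payroll Help", "action": "qb_payroll"},
--             {"text": "Installation", "action": "qb_install"}
--         ])
--
--     elif any(word in query_lower for word in ["rdp", "remote"]):
--         actions.extend([
--             {"text": "Connection Issues", "action": "rdp_connection"},
--             {"text": "Performance", "action": "rdp_performance"},
--             {"text": "Setup Guide", "action": "rdp_setup"}
--         ])
--
--     elif any(word in query_lower for word in ["email", "outlook"]):
--         actions.extend([
--             {"text": "Setup Email", "action": "email_setup"},
--             {"text": "Password Issues", "action": "email_password"},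
--             {"text": "Can't Send/Receive", "action": "email_sync"}
--         ])
--
--     # Always add general actions
--     actions.extend([
--         {"text": "Talk to Agent", "action": "escalate"},
--         {"text": "Start Over", "action": "restart"}
--     ])
--
--     return actions[:6]  # Limit to 6 actions
-- ===== SOURCE B (Python) =====
-- from typing import Dict, List
--
-- # Inverted index: keyword -> priority id of its action group.
-- _KEYWORD_GROUP = {
--     "password": 0, "reset": 0, "login": 0,
--     "quickbooks": 1, "qb": 1,
--     "rdp": 2, "remote": 2,
--     "email": 3, "outlook": 3,
-- }
--
-- _GROUPS = [
--     [{"text": "Reset Password", "action": "password_reset"},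
--      {"text": "Account Locked", "action": "account_locked"},
--      {"text": "Contact Support", "action": "escalate"}],
--     [{"text": "Error Codes", "action": "qb_errors"},
--      {"text": "File Issues", "action": "qb_files"},
--      {"text": "Payroll Help", "action": "qb_payroll"},
--      {"text": "Installation", "action": "qb_install"}],
--     [{"text": "Connection Issues", "action": "rdp_connection"},
--      {"text": "Performance", "action": "rdp_performance"},
--      {"text": "Setup Guide", "action": "rdp_setup"}],
--     [{"text": "Setup Email", "action": "email_setup"},
--      {"text": "Password Issues", "action": "email_password"},
--      {"text": "Can't Send/Receive", "action": "email_sync"}],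
-- ]
--
-- _GENERAL = [{"text": "Talk to Agent", "action": "escalate"},
--             {"text": "Start Over", "action": "restart"}]
--
-- def get_quick_actions(query: str) -> List[Dict[str, str]]:
--     """Get quick action buttons based on query (inverted-index version)."""
--     query_lower = query.lower()
--     hits = [gid for kw, gid in _KEYWORD_GROUP.items() if kw in query_lower]
--     group = _GROUPS[min(hits)] if hits else []
--     return (group + _GENERAL)[:6]
-- ===== Notes on version B (the rewrite author's own statement) =====
-- stated objective: alternative
-- what changed: Replaces the ordered if/elif keyword-group chain by a flat inverted index keyword->group id: all matching ids are collected in one comprehension and the minimum id (= highest-priority group) selects the action group, then the general actions and the [:6] slice.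
import Mathlib
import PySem

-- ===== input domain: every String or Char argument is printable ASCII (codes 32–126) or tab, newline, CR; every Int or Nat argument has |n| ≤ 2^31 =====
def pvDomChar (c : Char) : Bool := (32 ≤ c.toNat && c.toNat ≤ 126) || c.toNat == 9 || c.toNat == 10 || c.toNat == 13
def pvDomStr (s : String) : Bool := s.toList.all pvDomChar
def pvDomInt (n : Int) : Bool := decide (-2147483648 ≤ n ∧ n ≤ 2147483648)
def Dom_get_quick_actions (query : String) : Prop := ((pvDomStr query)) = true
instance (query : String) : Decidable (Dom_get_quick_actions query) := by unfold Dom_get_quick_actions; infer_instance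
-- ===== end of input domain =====

-- B replaces A's ordered if/elif keyword-group chain by a flat inverted index keyword→group id
-- whose matched ids are collected at once, the minimum id selecting the group (objective: simpler).

-- ===== PORT A =====
def get_quick_actions (query : String) : List (List (String × String)) :=
  let query_lower := PySem.Str.lower query
  let actions : List (List (String × String)) := []
  let actions :=
    if (["password", "reset", "login"].any fun word => PySem.Str.isIn word query_lower) then
      actions ++ [[("text", "Reset Password"), ("action", "password_reset")],
                  [("text", "Account Locked"), ("action", "account_locked")],
                  [("text", "Contact Support"), ("action", "escalate")]]
    else if (["quickbooks", "qb"].any fun word => PySem.Str.isIn word query_lower) then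
      actions ++ [[("text", "Error Codes"), ("action", "qb_errors")],
                  [("text", "File Issues"), ("action", "qb_files")],
                  [("text", "Payroll Help"), ("action", "qb_payroll")],
                  [("text", "Installation"), ("action", "qb_install")]]
    else if (["rdp", "remote"].any fun word => PySem.Str.isIn word query_lower) then
      actions ++ [[("text", "Connection Issues"), ("action", "rdp_connection")],
                  [("text", "Performance"), ("action", "rdp_performance")],
                  [("text", "Setup Guide"), ("action", "rdp_setup")]]
    else if (["email", "outlook"].any fun word => PySem.Str.isIn word query_lower) then
      actions ++ [[("text", "Setup Email"), ("action", "email_setup")],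
                  [("text", "Password Issues"), ("action", "email_password")],
                  [("text", "Can't Send/Receive"), ("action", "email_sync")]]
    else actions
  let actions := actions ++ [[("text", "Talk to Agent"), ("action", "escalate")],
                             [("text", "Start Over"), ("action", "restart")]]
  PySem.List.slice actions none (some 6)

-- ===== PORT B =====
-- inverted index: keyword -> priority id of its action group
def pvKeywordGroup : List (String × Int) :=
  [("password", 0), ("reset", 0), ("login", 0),
   ("quickbooks", 1), ("qb", 1),
   ("rdp", 2), ("remote", 2),
   ("email", 3), ("outlook", 3)]

def pvGroups : List (List (List (String × String))) :=
  [[[("text", "Reset Password"), ("action", "password_reset")],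
    [("text", "Account Locked"), ("action", "account_locked")],
    [("text", "Contact Support"), ("action", "escalate")]],
   [[("text", "Error Codes"), ("action", "qb_errors")],
    [("text", "File Issues"), ("action", "qb_files")],
    [("text", "Payroll Help"), ("action", "qb_payroll")],
    [("text", "Installation"), ("action", "qb_install")]],
   [[("text", "Connection Issues"), ("action", "rdp_connection")],
    [("text", "Performance"), ("action", "rdp_performance")],
    [("text", "Setup Guide"), ("action", "rdp_setup")]],
   [[("text", "Setup Email"), ("action", "email_setup")],
    [("text", "Password Issues"), ("action", "email_password")],
    [("text", "Can't Send/Receive"), ("action", "email_sync")]]]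

def pvGeneral : List (List (String × String)) :=
  [[("text", "Talk to Agent"), ("action", "escalate")],
   [("text", "Start Over"), ("action", "restart")]]

def get_quick_actions_alt (query : String) : List (List (String × String)) :=
  let query_lower := PySem.Str.lower query
  -- hits = [gid for kw, gid in _KEYWORD_GROUP.items() if kw in query_lower]
  let hits := pvKeywordGroup.foldl
    (fun acc kv => if PySem.Str.isIn kv.1 query_lower then acc ++ [kv.2] else acc) []
  -- group = _GROUPS[min(hits)] if hits else []
  let group :=
    if hits ≠ [] then
      match PySem.List.min? hits (fun x => x) with
      | some m => (PySem.List.pyGet? pvGroups m).getD []   -- index is always 0..3 here, so pyGet? never misses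
      | none => []
    else []
  PySem.List.slice (group ++ pvGeneral) none (some 6)

-- ===== PRECONDITION & SPEC =====
def Spec_get_quick_actions (query : String) (out : List (List (String × String))) : Prop := out = get_quick_actions_alt query
instance (query : String) (out : List (List (String × String))) : Decidable (Spec_get_quick_actions query out) := by unfold Spec_get_quick_actions; infer_instance

-- ===== CLAIM (what is proved, stated in full; the proofs are below) =====
def Claim_equal_get_quick_actions : Prop := ∀ (query : String), Dom_get_quick_actions query → Spec_get_quick_actions query (get_quick_actions query)

-- ===== LEMMAS AND PROOFS =====

-- A's computation with the nine keyword tests abstracted as booleans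
def pvACore (b1 b2 b3 b4 b5 b6 b7 b8 b9 : Bool) : List (List (String × String)) :=
  let actions : List (List (String × String)) := []
  let actions :=
    if ([b1, b2, b3].any fun x => x) then
      actions ++ [[("text", "Reset Password"), ("action", "password_reset")],
                  [("text", "Account Locked"), ("action", "account_locked")],
                  [("text", "Contact Support"), ("action", "escalate")]]
    else if ([b4, b5].any fun x => x) then
      actions ++ [[("text", "Error Codes"), ("action", "qb_errors")],
                  [("text", "File Issues"), ("action", "qb_files")],
                  [("text", "Payroll Help"), ("action", "qb_payroll")],
                  [("text", "Installation"), ("action", "qb_install")]]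
    else if ([b6, b7].any fun x => x) then
      actions ++ [[("text", "Connection Issues"), ("action", "rdp_connection")],
                  [("text", "Performance"), ("action", "rdp_performance")],
                  [("text", "Setup Guide"), ("action", "rdp_setup")]]
    else if ([b8, b9].any fun x => x) then
      actions ++ [[("text", "Setup Email"), ("action", "email_setup")],
                  [("text", "Password Issues"), ("action", "email_password")],
                  [("text", "Can't Send/Receive"), ("action", "email_sync")]]
    else actions
  let actions := actions ++ [[("text", "Talk to Agent"), ("action", "escalate")],
                             [("text", "Start Over"), ("action", "restart")]]
  PySem.List.slice actions none (some 6)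

-- B's computation with the same nine tests abstracted as booleans
def pvBCore (b1 b2 b3 b4 b5 b6 b7 b8 b9 : Bool) : List (List (String × String)) :=
  let hits := ([(b1, (0:Int)), (b2, 0), (b3, 0), (b4, 1), (b5, 1),
                (b6, 2), (b7, 2), (b8, 3), (b9, 3)]).foldl
    (fun acc kv => if kv.1 then acc ++ [kv.2] else acc) []
  let group :=
    if hits ≠ [] then
      match PySem.List.min? hits (fun x => x) with
      | some m => (PySem.List.pyGet? pvGroups m).getD []
      | none => []
    else []
  PySem.List.slice (group ++ pvGeneral) none (some 6)

theorem pvCore_eq : ∀ (b1 b2 b3 b4 b5 b6 b7 b8 b9 : Bool),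
    pvACore b1 b2 b3 b4 b5 b6 b7 b8 b9 = pvBCore b1 b2 b3 b4 b5 b6 b7 b8 b9 := by
  intro b1 b2 b3 b4 b5 b6 b7 b8 b9
  cases b1 <;> cases b2 <;> cases b3 <;> cases b4 <;> cases b5 <;>
    cases b6 <;> cases b7 <;> cases b8 <;> cases b9 <;> rfl

set_option maxHeartbeats 4000000 in
theorem pvA_eq (query : String) :
    get_quick_actions query =
      pvACore (PySem.Str.isIn "password" (PySem.Str.lower query))
        (PySem.Str.isIn "reset" (PySem.Str.lower query))
        (PySem.Str.isIn "login" (PySem.Str.lower query))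
        (PySem.Str.isIn "quickbooks" (PySem.Str.lower query))
        (PySem.Str.isIn "qb" (PySem.Str.lower query))
        (PySem.Str.isIn "rdp" (PySem.Str.lower query))
        (PySem.Str.isIn "remote" (PySem.Str.lower query))
        (PySem.Str.isIn "email" (PySem.Str.lower query))
        (PySem.Str.isIn "outlook" (PySem.Str.lower query)) := rfl

set_option maxHeartbeats 4000000 in
theorem pvB_eq (query : String) :
    get_quick_actions_alt query =
      pvBCore (PySem.Str.isIn "password" (PySem.Str.lower query))
        (PySem.Str.isIn "reset" (PySem.Str.lower query))
        (PySem.Str.isIn "login" (PySem.Str.lower query))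
        (PySem.Str.isIn "quickbooks" (PySem.Str.lower query))
        (PySem.Str.isIn "qb" (PySem.Str.lower query))
        (PySem.Str.isIn "rdp" (PySem.Str.lower query))
        (PySem.Str.isIn "remote" (PySem.Str.lower query))
        (PySem.Str.isIn "email" (PySem.Str.lower query))
        (PySem.Str.isIn "outlook" (PySem.Str.lower query)) := rfl

-- ===== VERDICT (by name: the statement is the Claim_ definition above) =====
set_option maxHeartbeats 1000000 in
theorem get_quick_actions_spec : Claim_equal_get_quick_actions := by
  intro query _
  show get_quick_actions query = get_quick_actions_alt query
  rw [pvA_eq, pvB_eq, pvCore_eq]
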